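-- pv_equiv track=rewrite | github.com/perigoso/pre-commit-hooks | hooks/check_accidental_assignment.py | check_parens_content
-- ===== SOURCE A (Python) =====
-- def check_parens_content(string: str, keyword: str, strict: bool = False) -> bool:
--     if keyword not in ['if', 'while', 'switch', 'for'] and not strict:
--         return True
--
--     if keyword == 'for':
--         # special case for for loops
--         # only check the middle part of the for loop, where the assignment is not allowed
--         string = string.split(';')[1]
--
--     inside_string = False
--
--     # check for assignment
--     for index, char in enumerate(string):
--         if char == '"':
--             inside_string = not inside_string
--             continue
--
--         if not inside_string and char == '=':
--             if index != 0:
--                 preciding_char = string[index-1]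
--                 if preciding_char in ['=', '!']:
--                     # not an assignment
--                     continue
--                 elif preciding_char in ['>', '<']:
--                     # special case for >>=, <<=
--                     if index > 1:
--                         pre_preciding_char = string[index-2]
--                         if pre_preciding_char == preciding_char:
--                             # <<= / >>= assignment detected
--                             return False
--                     # not an assignment
--                     continue
--
--             if index < len(string) - 1:
--                 succeding_char = string[index+1]
--                 if succeding_char in ['=']:
--                     # not an assignment
--                     continue
--
--             # assignment detected
--             return False
--
--     return True
-- ===== SOURCE B (Python) =====
-- import re
--
-- _ASSIGN_RE = re.compile(r'<<=|>>=|(?<![=!<>])=(?!=)')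
--
-- def check_parens_content(string: str, keyword: str, strict: bool = False) -> bool:
--     if keyword not in ['if', 'while', 'switch', 'for'] and not strict:
--         return True
--
--     if keyword == 'for':
--         string = string.split(';')[1]
--
--     # mask out string literals: every quote and every character inside
--     # (possibly unbalanced) quotes becomes a space
--     masked = []
--     inside = False
--     for ch in string:
--         if ch == '"':
--             inside = not inside
--             masked.append(' ')
--         elif inside:
--             masked.append(' ')
--         else:
--             masked.append(ch)
--
--     return _ASSIGN_RE.search(''.join(masked)) is None
-- ===== Notes on version B (the rewrite author's own statement) =====
-- stated objective: idiomatic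
-- what changed: A's manual index-based state machine with lookbehind/lookahead and in-string flag is replaced by a two-phase approach: one pass masks every quote and every character inside (possibly unbalanced) string literals to spaces, then a single regex search over the masked copy detects an assignment (<<=, >>=, or a bare = not adjacent to =,!,<,>).
import Mathlib
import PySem

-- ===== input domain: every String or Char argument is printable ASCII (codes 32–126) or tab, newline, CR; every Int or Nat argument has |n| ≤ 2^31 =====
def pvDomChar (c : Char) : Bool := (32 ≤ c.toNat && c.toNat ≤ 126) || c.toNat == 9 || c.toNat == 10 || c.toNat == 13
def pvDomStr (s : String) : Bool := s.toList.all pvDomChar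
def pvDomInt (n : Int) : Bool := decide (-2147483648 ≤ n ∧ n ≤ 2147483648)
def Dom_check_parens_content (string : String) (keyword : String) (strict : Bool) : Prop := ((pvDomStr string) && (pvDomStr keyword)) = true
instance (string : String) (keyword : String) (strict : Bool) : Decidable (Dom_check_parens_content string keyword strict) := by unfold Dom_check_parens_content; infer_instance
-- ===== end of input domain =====

-- B replaces A's index-based scanner (lookbehind/lookahead with manual string-state)
-- by masking quoted regions to spaces in one pass and then searching the masked text
-- for an assignment pattern (objective: idiomatic; return value only, no mutation).

-- ===== PORT A =====
-- A's scanning loop: index-based, with lookbehind string[index-1]/string[index-2]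
-- and lookahead string[index+1]; the early `return False` becomes returning `false`.
def aGo (cs : List Char) (inside : Bool) (idx : Nat) : Bool :=
  if h : idx < cs.length then
    let c := cs.getD idx ' '
    if c = '"' then aGo cs (!inside) (idx+1)
    else if inside = false ∧ c = '=' then
      if idx ≠ 0 ∧ (cs.getD (idx-1) ' ' = '=' ∨ cs.getD (idx-1) ' ' = '!') then
        aGo cs inside (idx+1)
      else if idx ≠ 0 ∧ (cs.getD (idx-1) ' ' = '>' ∨ cs.getD (idx-1) ' ' = '<') then
        if 1 < idx ∧ cs.getD (idx-2) ' ' = cs.getD (idx-1) ' ' then false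
        else aGo cs inside (idx+1)
      else if idx + 1 < cs.length ∧ cs.getD (idx+1) ' ' = '=' then aGo cs inside (idx+1)
      else false
    else aGo cs inside (idx+1)
  else true
termination_by cs.length - idx

def check_parens_content (string : String) (keyword : String) (strict : Bool) : Bool :=
  if ¬ (keyword ∈ ["if", "while", "switch", "for"]) ∧ ¬ (strict = true) then true
  else
    -- `string.split(';')[1]`; Pre_ guarantees the index exists (Python raises IndexError otherwise)
    aGo (if keyword = "for" then ((PySem.List.pyGet? ((PySem.Str.split? string ";").getD []) 1).getD "") else string).toList false 0

-- ===== PORT B =====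
-- Source B's masking loop: quotes and characters inside (possibly unbalanced) quotes become spaces
def maskFrom (inside : Bool) : List Char → List Char
  | [] => []
  | c :: t =>
    if c = '"' then ' ' :: maskFrom (!inside) t
    else if inside then ' ' :: maskFrom inside t
    else c :: maskFrom inside t

def bans (c : Char) : Bool := c = '=' || c = '!' || c = '<' || c = '>'

-- hand port of re.search(r'<<=|>>=|(?<![=!<>])=(?!=)', masked): left-to-right scan;
-- at each position try `<<=`, `>>=`, then `=` with the lookbehind/lookahead; exact,
-- since only whether SOME match exists is returned.
def bSearch (prev : Option Char) : List Char → Bool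
  | [] => false
  | c :: t =>
    if (c = '<' ∧ t.take 2 = ['<', '=']) ∨ (c = '>' ∧ t.take 2 = ['>', '=']) ∨
       (c = '=' ∧ prev.any bans = false ∧ t.head? ≠ some '=')
    then true
    else bSearch (some c) t

def check_parens_content_alt (string : String) (keyword : String) (strict : Bool) : Bool :=
  if ¬ (keyword ∈ ["if", "while", "switch", "for"]) ∧ ¬ (strict = true) then true
  else
    !bSearch none (maskFrom false (if keyword = "for" then ((PySem.List.pyGet? ((PySem.Str.split? string ";").getD []) 1).getD "") else string).toList)

-- ===== PRECONDITION & SPEC =====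
-- Pre_ excludes only keyword = "for" with no ';' in string: there A (and B alike) raise IndexError on split(';')[1].
def Pre_check_parens_content (string : String) (keyword : String) (strict : Bool) : Prop :=
  keyword = "for" → ';' ∈ string.toList
instance (string : String) (keyword : String) (strict : Bool) : Decidable (Pre_check_parens_content string keyword strict) := by unfold Pre_check_parens_content; infer_instance

def pvWitness_check_parens_content : String × String × Bool := ("x = 0; i < n; i++", "for", false)

def Spec_check_parens_content (string : String) (keyword : String) (strict : Bool) (out : Bool) : Prop := out = check_parens_content_alt string keyword strict
instance (string : String) (keyword : String) (strict : Bool) (out : Bool) : Decidable (Spec_check_parens_content string keyword strict out) := by unfold Spec_check_parens_content; infer_instance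

-- ===== CLAIM (what is proved, stated in full; the proofs are below) =====
def Claim_equal_check_parens_content : Prop := ∀ (string : String) (keyword : String) (strict : Bool), Dom_check_parens_content string keyword strict → Pre_check_parens_content string keyword strict → Spec_check_parens_content string keyword strict (check_parens_content string keyword strict)

-- ===== LEMMAS AND PROOFS =====

-- A's loop restated as structural recursion over the remaining characters,
-- carrying the two preceding characters (pp = string[idx-2], p = string[idx-1])
def aList (pp p : Option Char) (inside : Bool) : List Char → Bool
  | [] => true
  | c :: t =>
    if c = '"' then aList p (some c) (!inside) t
    else if inside = false ∧ c = '=' then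
      match p with
      | some q =>
        if q = '=' ∨ q = '!' then aList p (some c) inside t
        else if q = '>' ∨ q = '<' then
          match pp with
          | some r => if r = q then false else aList p (some c) inside t
          | none => aList p (some c) inside t
        else if t.head? = some '=' then aList p (some c) inside t else false
      | none => if t.head? = some '=' then aList p (some c) inside t else false
    else aList p (some c) inside t

def pAt (cs : List Char) (idx : Nat) : Option Char := if idx = 0 then none else cs[idx-1]?
def ppAt (cs : List Char) (idx : Nat) : Option Char := if idx ≤ 1 then none else cs[idx-2]?

-- the masked value of the character preceding the current position
def prevM (p : Option Char) (inside : Bool) : Option Char :=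
  p.map (fun c => if c = '"' ∨ inside then ' ' else c)

-- states in which A is still bound to report a `<<=`/`>>=` whose leading character(s)
-- were already consumed (bSearch detected that pattern one or two characters earlier)
def badS (pp p : Option Char) (inside : Bool) (l : List Char) : Prop :=
  inside = false ∧ ∃ d, (d = '<' ∨ d = '>') ∧ p = some d ∧
    (l.take 2 = [d, '='] ∨ (pp = some d ∧ l.head? = some '='))

theorem getD_lt (cs : List Char) (i : Nat) (h : i < cs.length) : cs.getD i ' ' = cs[i] := by
  simp [List.getD_eq_getElem?_getD, List.getElem?_eq_getElem h]

theorem pAt_succ (cs : List Char) (idx : Nat) (h : idx < cs.length) :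
    pAt cs (idx+1) = some (cs.getD idx ' ') := by
  unfold pAt
  rw [if_neg (by omega)]
  simp [List.getElem?_eq_getElem h]

theorem ppAt_succ (cs : List Char) (i : Nat) : ppAt cs (i+1) = pAt cs i := by
  unfold ppAt pAt
  rcases Nat.eq_zero_or_pos i with h | h
  · simp [h]
  · rw [if_neg (by omega), if_neg (by omega)]
    have he : i + 1 - 2 = i - 1 := by omega
    rw [he]

theorem pAt_eq (cs : List Char) (idx : Nat) (hl : idx ≤ cs.length) (h0 : idx ≠ 0) :
    pAt cs idx = some (cs.getD (idx-1) ' ') := by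
  have hlt : idx - 1 < cs.length := by omega
  unfold pAt
  rw [if_neg h0]
  simp [List.getElem?_eq_getElem hlt]

theorem ppAt_eq (cs : List Char) (idx : Nat) (hl : idx ≤ cs.length) (h1 : 1 < idx) :
    ppAt cs idx = some (cs.getD (idx-2) ' ') := by
  have hlt : idx - 2 < cs.length := by omega
  unfold ppAt
  rw [if_neg (by omega)]
  simp [List.getElem?_eq_getElem hlt]

theorem head?_drop_eq (cs : List Char) (i : Nat) : (List.drop i cs).head? = cs[i]? := by
  simp [List.head?_drop]

theorem aGo_eq_aList (cs : List Char) (inside : Bool) (idx : Nat) :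
    aGo cs inside idx = aList (ppAt cs idx) (pAt cs idx) inside (cs.drop idx) := by
  fun_induction aGo cs inside idx with
  | case1 ins idx hlt c hc ih =>
    have hc' : cs.getD idx ' ' = '"' := hc
    have hdrop : List.drop idx cs = cs.getD idx ' ' :: List.drop (idx+1) cs := by
      rw [List.drop_eq_getElem_cons hlt, getD_lt cs idx hlt]
    rw [ih, ppAt_succ, pAt_succ cs idx hlt, hdrop, hc']
    simp [aList]
  | case2 ins idx hlt c hquote hc hcond ih =>
    obtain ⟨hin, hceq⟩ := hc
    obtain ⟨h0, hq⟩ := hcond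
    subst hin
    have hceq' : cs.getD idx ' ' = '=' := hceq
    have hpA : pAt cs idx = some (cs.getD (idx-1) ' ') := pAt_eq cs idx (by omega) h0
    have hdrop : List.drop idx cs = cs.getD idx ' ' :: List.drop (idx+1) cs := by
      rw [List.drop_eq_getElem_cons hlt, getD_lt cs idx hlt]
    rw [ih, ppAt_succ, pAt_succ cs idx hlt, hdrop, hceq']
    rcases hq with h | h <;> simp only [aList] <;> rw [hpA, h] <;> simp
  | case3 ins idx hlt c hquote hc hc2 hcond hpre =>
    obtain ⟨hin, hceq⟩ := hc
    obtain ⟨h0, hq⟩ := hcond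
    obtain ⟨h1, hr⟩ := hpre
    subst hin
    have hceq' : cs.getD idx ' ' = '=' := hceq
    have hpA : pAt cs idx = some (cs.getD (idx-1) ' ') := pAt_eq cs idx (by omega) h0
    have hppA : ppAt cs idx = some (cs.getD (idx-2) ' ') := ppAt_eq cs idx (by omega) h1
    have hdrop : List.drop idx cs = cs.getD idx ' ' :: List.drop (idx+1) cs := by
      rw [List.drop_eq_getElem_cons hlt, getD_lt cs idx hlt]
    rw [hdrop, hceq']
    rcases hq with h | h <;> rw [h] at hr <;> simp only [aList] <;> rw [hpA, hppA, h, hr] <;> simp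
  | case4 ins idx hlt c hquote hc hc2 hcond hpre ih =>
    obtain ⟨hin, hceq⟩ := hc
    obtain ⟨h0, hq⟩ := hcond
    subst hin
    have hceq' : cs.getD idx ' ' = '=' := hceq
    have hpA : pAt cs idx = some (cs.getD (idx-1) ' ') := pAt_eq cs idx (by omega) h0
    have hdrop : List.drop idx cs = cs.getD idx ' ' :: List.drop (idx+1) cs := by
      rw [List.drop_eq_getElem_cons hlt, getD_lt cs idx hlt]
    rw [ih, ppAt_succ, pAt_succ cs idx hlt, hdrop, hceq']
    rcases Nat.lt_or_ge 1 idx with h1 | h1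
    · have hppA : ppAt cs idx = some (cs.getD (idx-2) ' ') := ppAt_eq cs idx (by omega) h1
      have hrne : ¬ cs.getD (idx-2) ' ' = cs.getD (idx-1) ' ' := fun hh => hpre ⟨h1, hh⟩
      rcases hq with h | h <;> rw [h] at hrne <;> simp only [aList] <;> rw [hpA, hppA, h] <;> simp only [List.getD_eq_getElem?_getD] at hrne <;> simp [hrne]
    · have hppA : ppAt cs idx = none := by unfold ppAt; rw [if_pos (by omega)]
      rcases hq with h | h <;> simp only [aList] <;> rw [hpA, hppA, h] <;> simp
  | case5 ins idx hlt c hquote hc hc2 hc3 hcond ih =>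
    obtain ⟨hin, hceq⟩ := hc
    obtain ⟨hlt1, hsucc⟩ := hcond
    subst hin
    have hceq' : cs.getD idx ' ' = '=' := hceq
    have hdrop : List.drop idx cs = cs.getD idx ' ' :: List.drop (idx+1) cs := by
      rw [List.drop_eq_getElem_cons hlt, getD_lt cs idx hlt]
    have hhead : (List.drop (idx+1) cs).head? = some '=' := by
      rw [head?_drop_eq, List.getElem?_eq_getElem hlt1, ← getD_lt cs _ hlt1, hsucc]
    rw [ih, ppAt_succ, pAt_succ cs idx hlt, hdrop, hceq']
    rcases Nat.eq_zero_or_pos idx with h0 | h0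
    · have hpA : pAt cs idx = none := by unfold pAt; rw [if_pos h0]
      simp only [aList]
      rw [hpA]
      simp [hhead]
    · have hpA : pAt cs idx = some (cs.getD (idx-1) ' ') := pAt_eq cs idx (by omega) (by omega)
      have hne1 : ¬(cs.getD (idx-1) ' ' = '=' ∨ cs.getD (idx-1) ' ' = '!') := fun hh => hc2 ⟨by omega, hh⟩
      have hne2 : ¬(cs.getD (idx-1) ' ' = '>' ∨ cs.getD (idx-1) ' ' = '<') := fun hh => hc3 ⟨by omega, hh⟩
      simp only [aList]
      rw [hpA]
      simp only [List.getD_eq_getElem?_getD] at hne1 hne2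
      simp [hne1, hne2, hhead]
  | case6 ins idx hlt c hquote hc hc2 hc3 hcond =>
    obtain ⟨hin, hceq⟩ := hc
    subst hin
    have hceq' : cs.getD idx ' ' = '=' := hceq
    have hdrop : List.drop idx cs = cs.getD idx ' ' :: List.drop (idx+1) cs := by
      rw [List.drop_eq_getElem_cons hlt, getD_lt cs idx hlt]
    have hhead : ¬ cs[idx+1]? = some '=' := by
      rcases Nat.lt_or_ge (idx+1) cs.length with hl | hl
      · rw [List.getElem?_eq_getElem hl, ← getD_lt cs _ hl]
        intro hh
        exact hcond ⟨hl, by simpa using hh⟩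
      · simp [List.getElem?_eq_none (by omega)]
    rw [hdrop, hceq']
    rcases Nat.eq_zero_or_pos idx with h0 | h0
    · have hpA : pAt cs idx = none := by unfold pAt; rw [if_pos h0]
      simp only [aList]
      rw [hpA]
      simp [hhead]
    · have hpA : pAt cs idx = some (cs.getD (idx-1) ' ') := pAt_eq cs idx (by omega) (by omega)
      have hne1 : ¬(cs.getD (idx-1) ' ' = '=' ∨ cs.getD (idx-1) ' ' = '!') := fun hh => hc2 ⟨by omega, hh⟩
      have hne2 : ¬(cs.getD (idx-1) ' ' = '>' ∨ cs.getD (idx-1) ' ' = '<') := fun hh => hc3 ⟨by omega, hh⟩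
      simp only [aList]
      rw [hpA]
      simp only [List.getD_eq_getElem?_getD] at hne1 hne2
      simp [hne1, hne2, hhead]
  | case7 ins idx hlt c hquote hc ih =>
    have hdrop : List.drop idx cs = cs.getD idx ' ' :: List.drop (idx+1) cs := by
      rw [List.drop_eq_getElem_cons hlt, getD_lt cs idx hlt]
    have hquote' : ¬ cs.getD idx ' ' = '"' := hquote
    have hc' : ¬ (ins = false ∧ cs.getD idx ' ' = '=') := hc
    rw [ih, ppAt_succ, pAt_succ cs idx hlt, hdrop]
    simp only [aList]
    rw [if_neg hquote', if_neg hc']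
  | case8 ins idx hge =>
    rw [List.drop_eq_nil_of_le (by omega)]
    simp [aList]

theorem mask_head_eq (t : List Char) : ((maskFrom false t).head? = some '=') ↔ (t.head? = some '=') := by
  cases t with
  | nil => simp [maskFrom]
  | cons d t1 =>
    by_cases hd : d = '"' <;> simp [maskFrom, hd]

theorem mask_take2 (t : List Char) (d : Char) (hd : d = '<' ∨ d = '>') :
    ((maskFrom false t).take 2 = [d, '='] ↔ t.take 2 = [d, '=']) := by
  cases t with
  | nil => simp [maskFrom]
  | cons d1 t1 =>
    cases t1 with
    | nil =>
      by_cases h1 : d1 = '"' <;> rcases hd with hd | hd <;> simp [maskFrom, h1, hd]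
    | cons d2 t2 =>
      by_cases h1 : d1 = '"' <;> by_cases h2 : d2 = '"' <;> rcases hd with hd | hd <;>
        subst hd <;> simp [maskFrom, h1, h2]
theorem aList_eq_bSearch (l : List Char) : ∀ (pp p : Option Char) (inside : Bool),
    ¬ badS pp p inside l →
    aList pp p inside l = !bSearch (prevM p inside) (maskFrom inside l) := by
  induction l with
  | nil => intro pp p inside _; simp [aList, maskFrom, bSearch]
  | cons c t ih =>
    intro pp p inside hb
    by_cases hc : c = '"'
    · subst hc
      rw [show maskFrom inside ('"' :: t) = ' ' :: maskFrom (!inside) t from by simp [maskFrom]]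
      rw [show aList pp p inside ('"' :: t) = aList p (some '"') (!inside) t from by simp [aList]]
      rw [show bSearch (prevM p inside) (' ' :: maskFrom (!inside) t) = bSearch (some ' ') (maskFrom (!inside) t) from by simp [bSearch]]
      rw [show (some ' ' : Option Char) = prevM (some '"') (!inside) from by simp [prevM]]
      exact ih p (some '"') (!inside) (by simp [badS])
    · by_cases hin : inside
      · rw [show maskFrom inside (c :: t) = ' ' :: maskFrom inside t from by simp [maskFrom, hc, hin]]
        rw [show aList pp p inside (c :: t) = aList p (some c) inside t from by simp [aList, hc, hin]]
        rw [show bSearch (prevM p inside) (' ' :: maskFrom inside t) = bSearch (some ' ') (maskFrom inside t) from by simp [bSearch]]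
        rw [show (some ' ' : Option Char) = prevM (some c) inside from by simp [prevM, hin]]
        exact ih p (some c) inside (by simp [badS, hin])
      · have hinf : inside = false := by simpa using hin
        subst hinf
        by_cases hce : c = '='
        · subst hce
          rw [show maskFrom false ('=' :: t) = '=' :: maskFrom false t from by simp [maskFrom]]
          cases p with
          | none =>
            by_cases th : t.head? = some '='
            · have hmh : (maskFrom false t).head? = some '=' := (mask_head_eq t).2 th
              rw [show bSearch (prevM none false) ('=' :: maskFrom false t) = bSearch (some '=') (maskFrom false t) from by
                simp [bSearch, prevM, hmh]]
              rw [show aList pp none false ('=' :: t) = aList none (some '=') false t from by simp [aList, th]]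
              rw [show (some '=' : Option Char) = prevM (some '=') false from by simp [prevM]]
              exact ih none (some '=') false (by simp [badS])
            · have hmh : ¬ (maskFrom false t).head? = some '=' := fun h => th ((mask_head_eq t).1 h)
              rw [show bSearch (prevM none false) ('=' :: maskFrom false t) = true from by
                simp [bSearch, prevM, hmh]]
              simp [aList, th]
          | some q =>
            by_cases hq1 : q = '=' ∨ q = '!'
            · have hbans : (prevM (some q) false).any bans = true := by
                rcases hq1 with h | h <;> simp [prevM, bans, h]
              rw [show bSearch (prevM (some q) false) ('=' :: maskFrom false t) = bSearch (some '=') (maskFrom false t) from by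
                simp [bSearch, hbans]]
              rw [show aList pp (some q) false ('=' :: t) = aList (some q) (some '=') false t from by simp [aList, hq1]]
              rw [show (some '=' : Option Char) = prevM (some '=') false from by simp [prevM]]
              exact ih (some q) (some '=') false (by simp [badS])
            · by_cases hq2 : q = '>' ∨ q = '<'
              · have hbans : (prevM (some q) false).any bans = true := by
                  rcases hq2 with h | h <;> simp [prevM, bans, h]
                rw [show bSearch (prevM (some q) false) ('=' :: maskFrom false t) = bSearch (some '=') (maskFrom false t) from by
                  simp [bSearch, hbans]]
                cases pp with
                | none =>
                  rw [show aList none (some q) false ('=' :: t) = aList (some q) (some '=') false t from by simp [aList, hq1, hq2]]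
                  rw [show (some '=' : Option Char) = prevM (some '=') false from by simp [prevM]]
                  exact ih (some q) (some '=') false (by simp [badS])
                | some r =>
                  by_cases hr : r = q
                  · exfalso
                    apply hb
                    refine ⟨rfl, q, by tauto, rfl, Or.inr ⟨by rw [hr], rfl⟩⟩
                  · rw [show aList (some r) (some q) false ('=' :: t) = aList (some q) (some '=') false t from by simp [aList, hq1, hq2, hr]]
                    rw [show (some '=' : Option Char) = prevM (some '=') false from by simp [prevM]]
                    exact ih (some q) (some '=') false (by simp [badS])
              · push Not at hq1 hq2
                have hbans : (prevM (some q) false).any bans = false := by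
                  by_cases hqq : q = '"' <;> simp [prevM, bans, hqq, hq1.1, hq1.2, hq2.1, hq2.2]
                by_cases th : t.head? = some '='
                · have hmh : (maskFrom false t).head? = some '=' := (mask_head_eq t).2 th
                  rw [show bSearch (prevM (some q) false) ('=' :: maskFrom false t) = bSearch (some '=') (maskFrom false t) from by
                    simp [bSearch, hbans, hmh]]
                  rw [show aList pp (some q) false ('=' :: t) = aList (some q) (some '=') false t from by
                    simp [aList, hq1.1, hq1.2, hq2.1, hq2.2, th]]
                  rw [show (some '=' : Option Char) = prevM (some '=') false from by simp [prevM]]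
                  exact ih (some q) (some '=') false (by simp [badS])
                · have hmh : ¬ (maskFrom false t).head? = some '=' := fun h => th ((mask_head_eq t).1 h)
                  rw [show bSearch (prevM (some q) false) ('=' :: maskFrom false t) = true from by
                    simp [bSearch, hbans, hmh]]
                  simp [aList, hq1.1, hq1.2, hq2.1, hq2.2, th]
        · rw [show maskFrom false (c :: t) = c :: maskFrom false t from by simp [maskFrom, hc]]
          by_cases hf1 : c = '<' ∧ t.take 2 = ['<', '=']
          · obtain ⟨hcl, ht⟩ := hf1
            subst hcl
            obtain ⟨t2, rfl⟩ : ∃ t2, t = '<' :: '=' :: t2 := by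
              cases t with
              | nil => simp at ht
              | cons a t1 =>
                cases t1 with
                | nil => simp at ht
                | cons b t2 =>
                  simp at ht
                  exact ⟨t2, by rw [ht.1, ht.2]⟩
            rw [show bSearch (prevM p false) ('<' :: maskFrom false ('<' :: '=' :: t2)) = true from by
              simp [bSearch, (mask_take2 ('<' :: '=' :: t2) '<' (Or.inl rfl)).2 (by simp)]]
            simp [aList]
          · by_cases hf2 : c = '>' ∧ t.take 2 = ['>', '=']
            · obtain ⟨hcl, ht⟩ := hf2
              subst hcl
              obtain ⟨t2, rfl⟩ : ∃ t2, t = '>' :: '=' :: t2 := by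
                cases t with
                | nil => simp at ht
                | cons a t1 =>
                  cases t1 with
                  | nil => simp at ht
                  | cons b t2 =>
                    simp at ht
                    exact ⟨t2, by rw [ht.1, ht.2]⟩
              rw [show bSearch (prevM p false) ('>' :: maskFrom false ('>' :: '=' :: t2)) = true from by
                simp [bSearch, (mask_take2 ('>' :: '=' :: t2) '>' (Or.inr rfl)).2 (by simp)]]
              simp [aList]
            · have hnc : ¬((c = '<' ∧ (maskFrom false t).take 2 = ['<', '=']) ∨ (c = '>' ∧ (maskFrom false t).take 2 = ['>', '=']) ∨
                  (c = '=' ∧ (prevM p false).any bans = false ∧ (maskFrom false t).head? ≠ some '=')) := by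
                rintro (⟨h1, h2⟩ | ⟨h1, h2⟩ | ⟨h1, -⟩)
                · exact hf1 ⟨h1, (mask_take2 t '<' (Or.inl rfl)).1 h2⟩
                · exact hf2 ⟨h1, (mask_take2 t '>' (Or.inr rfl)).1 h2⟩
                · exact hce h1
              rw [show bSearch (prevM p false) (c :: maskFrom false t) = bSearch (some c) (maskFrom false t) from by
                simp only [bSearch]
                rw [if_neg hnc]]
              rw [show aList pp p false (c :: t) = aList p (some c) false t from by simp [aList, hc, hce]]
              have hpm : prevM (some c) false = some c := by simp [prevM, hc]
              conv_rhs => rw [← hpm]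
              apply ih p (some c) false
              rintro ⟨-, d, hd, hdc, hdisj⟩
              have hcd : c = d := by injection hdc
              subst hcd
              rcases hdisj with h2 | ⟨hp2, hh2⟩
              · rcases hd with h | h <;> subst h
                · exact hf1 ⟨rfl, h2⟩
                · exact hf2 ⟨rfl, h2⟩
              · apply hb
                refine ⟨rfl, c, hd, hp2, Or.inl ?_⟩
                cases t with
                | nil => simp at hh2
                | cons a t1 =>
                  simp at hh2
                  simp [hh2]

-- ===== VERDICT (by name: the statement is the Claim_ definition above) =====
theorem check_parens_content_spec : Claim_equal_check_parens_content := by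
  intro string keyword strict _ _
  unfold Spec_check_parens_content check_parens_content check_parens_content_alt
  by_cases hg : ¬ (keyword ∈ ["if", "while", "switch", "for"]) ∧ ¬ (strict = true)
  · rw [if_pos hg, if_pos hg]
  · rw [if_neg hg, if_neg hg]
    rw [aGo_eq_aList]
    rw [show ∀ cs : List Char, ppAt cs 0 = none from fun cs => by simp [ppAt]]
    rw [show ∀ cs : List Char, pAt cs 0 = none from fun cs => by simp [pAt]]
    rw [List.drop_zero]
    rw [aList_eq_bSearch _ none none false (by simp [badS])]
    rfl
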